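-- pv_equiv track=rewrite | github.com/paul5404/Python_coding | main.py | treasure
-- ===== SOURCE A (Python) =====
-- def treasure(a, b):
--     a.sort()
--     cnt = 0
--
--     for item_a in a:
--         biggest = max(b)
--         cnt += item_a * biggest
--         b.remove(biggest)
--
--     return cnt
-- ===== SOURCE B (Python) =====
-- def treasure(a, b):
--     return sum(x * y for x, y in zip(sorted(a), sorted(b, reverse=True)))
-- ===== Notes on version B (the rewrite author's own statement) =====
-- stated objective: faster
-- what changed: Replaces the quadratic loop (repeated max() scan and remove() over b) by sorting both lists once (a ascending, b descending) and summing the zipped products.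
-- outside the precondition, e.g. on treasure([1, 2], [5]): A raises ValueError, B returns 5
import Mathlib
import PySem

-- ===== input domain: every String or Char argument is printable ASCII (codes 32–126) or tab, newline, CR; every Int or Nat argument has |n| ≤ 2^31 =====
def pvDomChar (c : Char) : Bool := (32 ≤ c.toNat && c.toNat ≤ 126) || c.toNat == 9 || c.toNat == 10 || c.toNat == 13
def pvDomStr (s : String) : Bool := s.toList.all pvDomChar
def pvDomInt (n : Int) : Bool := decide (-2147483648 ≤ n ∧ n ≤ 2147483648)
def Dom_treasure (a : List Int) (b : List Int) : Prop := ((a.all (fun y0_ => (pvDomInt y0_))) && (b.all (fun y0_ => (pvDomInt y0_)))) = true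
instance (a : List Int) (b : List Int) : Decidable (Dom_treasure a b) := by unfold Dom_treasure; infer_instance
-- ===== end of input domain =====

-- B sorts both lists once (a ascending, b descending) and sums the zipped products instead of
-- A's repeated max()/remove() scans of b.  Equivalence is about the RETURN value only: Python A
-- mutates its arguments (sorts a in place and removes the used elements from b); B does not.

-- ===== PORT A =====
-- the for-loop of A: state = (remaining items of sorted a, current b, cnt)
def treasureLoop : List Int → List Int → Int → Int
  | [], _, cnt => cnt
  | item :: rest, b, cnt =>
    match PySem.List.max? b (fun y => y) with
    | none => cnt          -- Python raises ValueError here; excluded by Pre_treasure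
    | some biggest =>
      match PySem.List.remove? b biggest with
      | none => cnt        -- unreachable: biggest ∈ b
      | some b' => treasureLoop rest b' (cnt + item * biggest)

def treasure (a : List Int) (b : List Int) : Int :=
  treasureLoop (PySem.List.sorted a (fun x => x) false) b 0

-- ===== PORT B =====
def treasure_alt (a : List Int) (b : List Int) : Int :=
  (((PySem.List.sorted a (fun x => x) false).zip
      (PySem.List.sorted b (fun x => x) true)).foldl (fun s p => s + p.1 * p.2) 0)

-- ===== PRECONDITION & SPEC =====
-- Pre_ excludes exactly the inputs where Python A raises ValueError: max() of an empty b when a is longer than b.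
def Pre_treasure (a : List Int) (b : List Int) : Prop := a.length ≤ b.length
instance (a : List Int) (b : List Int) : Decidable (Pre_treasure a b) := by unfold Pre_treasure; infer_instance
def pvWitness_treasure : List Int × List Int := ([2, 1, 3], [4, 5, 6])

def Spec_treasure (a : List Int) (b : List Int) (out : Int) : Prop := out = treasure_alt a b
instance (a : List Int) (b : List Int) (out : Int) : Decidable (Spec_treasure a b out) := by unfold Spec_treasure; infer_instance

-- ===== CLAIM (what is proved, stated in full; the proofs are below) =====
def Claim_equal_treasure : Prop := ∀ (a : List Int) (b : List Int), Dom_treasure a b → Pre_treasure a b → Spec_treasure a b (treasure a b)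

-- ===== LEMMAS AND PROOFS =====

-- the descending sort of b is its first maximum followed by the descending sort of b with that occurrence erased
lemma sortedDesc_cons_max (b : List Int) (m : Int)
    (hm : PySem.List.max? b (fun y => y) = some m) :
    PySem.List.sorted b (fun x => x) true = m :: PySem.List.sorted (b.erase m) (fun x => x) true := by
  have hmem : m ∈ b := PySem.List.max?_mem hm
  have hmax : ∀ y ∈ b, y ≤ m := by
    intro y hy; simpa using PySem.List.max?_isMax hm y hy
  have hperm1 : List.Perm (PySem.List.sorted b (fun x => x) true) b := PySem.List.sorted_perm b _ true
  have hperm2 : List.Perm (m :: PySem.List.sorted (b.erase m) (fun x => x) true) b := by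
    exact (List.Perm.cons m (PySem.List.sorted_perm _ _ true)).trans (List.perm_cons_erase hmem).symm
  have hs1 : (PySem.List.sorted b (fun x => x) true).Pairwise (fun x y => y ≤ x) := by
    simpa using PySem.List.sorted_pairwise_rev b (fun x => x)
  have hs2 : (m :: PySem.List.sorted (b.erase m) (fun x => x) true).Pairwise (fun x y => y ≤ x) := by
    refine List.Pairwise.cons ?_ (by simpa using PySem.List.sorted_pairwise_rev (b.erase m) (fun x => x))
    intro y hy
    exact hmax y (List.mem_of_mem_erase ((PySem.List.sorted_perm _ _ true).mem_iff.mp hy))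
  exact List.Perm.eq_of_pairwise (fun x y _ _ h1 h2 => le_antisymm h2 h1) hs1 hs2 (hperm1.trans hperm2.symm)

-- the loop of A computes cnt plus the sum of products of the zip with the descending sort of b
lemma treasureLoop_eq (xs : List Int) : ∀ (b : List Int) (cnt : Int), xs.length ≤ b.length →
    treasureLoop xs b cnt
      = cnt + ((xs.zip (PySem.List.sorted b (fun x => x) true)).map (fun p => p.1 * p.2)).sum := by
  induction xs with
  | nil => intro b cnt _; simp [treasureLoop]
  | cons x xs ih =>
    intro b cnt hlen
    have hb : b ≠ [] := by
      intro h; subst h; simp at hlen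
    obtain ⟨m, hm⟩ : ∃ m, PySem.List.max? b (fun y => y) = some m := by
      cases h : PySem.List.max? b (fun y => y) with
      | none => exact absurd ((PySem.List.max?_eq_none_iff _ _).mp h) hb
      | some m => exact ⟨m, rfl⟩
    have hmem : m ∈ b := PySem.List.max?_mem hm
    have hrem : PySem.List.remove? b m = some (b.erase m) := PySem.List.remove?_eq_some_erase b m hmem
    have hlen' : xs.length ≤ (b.erase m).length := by
      have := List.length_erase_of_mem hmem
      simp at hlen; omega
    rw [sortedDesc_cons_max b m hm]
    simp only [treasureLoop, hm, hrem, List.zip_cons_cons, List.map_cons, List.sum_cons]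
    rw [ih (b.erase m) (cnt + x * m) hlen']
    ring

-- ===== VERDICT (by name: the statement is the Claim_ definition above) =====
theorem treasure_spec : Claim_equal_treasure := by
  intro a b _ hpre
  unfold Spec_treasure treasure treasure_alt
  rw [treasureLoop_eq _ b 0 (by simpa [PySem.List.length_sorted] using hpre)]
  rw [PySem.List.foldl_add]
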